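-- pv_equiv track=rewrite | github.com/ionic101/sort-maze | run.py | parse_initial_state
-- ===== SOURCE A (Python) =====
-- def parse_initial_state(lines):
--     hallway = tuple(lines[1][1:12])
--     room_depth = len(lines) - 3
--     rooms = []
--     for room_index in range(4):
--         room = []
--         for depth_index in range(room_depth):
--             room.append(lines[2 + depth_index][3 + 2 * room_index])
--         rooms.append(tuple(room))
--     return hallway, tuple(rooms)
-- ===== SOURCE B (Python) =====
-- def parse_initial_state(lines):
--     hallway = tuple(lines[1][1:12])
--     rows = [(line[3], line[5], line[7], line[9]) for line in lines[2:len(lines) - 1]]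
--     rooms = tuple(zip(*rows)) if rows else ((), (), (), ())
--     return hallway, rooms
-- ===== Notes on version B (the rewrite author's own statement) =====
-- stated objective: idiomatic
-- what changed: B builds the used room rows in one pass (characters at columns 3,5,7,9 of lines[2:-1]) and transposes them with zip(*rows) to obtain the four rooms, instead of A's room-major nested index loop over 4 rooms x depth.
import Mathlib
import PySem

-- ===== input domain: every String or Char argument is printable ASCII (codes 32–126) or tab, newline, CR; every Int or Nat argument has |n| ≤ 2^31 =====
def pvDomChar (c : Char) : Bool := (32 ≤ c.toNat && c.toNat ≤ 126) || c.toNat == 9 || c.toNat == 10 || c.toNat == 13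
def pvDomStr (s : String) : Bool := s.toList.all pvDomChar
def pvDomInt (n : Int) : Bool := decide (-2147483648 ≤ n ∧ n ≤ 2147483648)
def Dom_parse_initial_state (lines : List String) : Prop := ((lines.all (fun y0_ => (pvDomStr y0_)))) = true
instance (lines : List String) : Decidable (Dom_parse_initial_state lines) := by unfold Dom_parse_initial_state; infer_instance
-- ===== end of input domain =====

-- B parses the rooms row-major (one pass over the row lines, then a zip(*rows) transpose) instead of
-- A's room-major nested index loop; same result, a more idiomatic decomposition (no speed claim).

-- ===== PORT A =====
def parse_initial_state (lines : List String) : List String × List (List String) :=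
  -- hallway = tuple(lines[1][1:12]); pyGet?/pyGetD: none/default exactly where Python raises, excluded by Pre_
  let hallway : List String :=
    (PySem.Str.slice (PySem.List.pyGetD lines 1 "") (some 1) (some 12)).toList.map
      (fun c => String.ofList [c])
  -- room_depth = len(lines) - 3
  let room_depth : Int := (lines.length : Int) - 3
  -- for room_index in range(4): for depth_index in range(room_depth): room.append(lines[2+d][3+2*i])
  let rooms : List (List String) :=
    (PySem.List.pyRange 0 4 1).foldl (fun rooms room_index =>
      let room : List String :=
        (PySem.List.pyRange 0 room_depth 1).foldl (fun room depth_index =>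
          room ++ [String.ofList
            [((PySem.Str.pyGet? (PySem.List.pyGetD lines (2 + depth_index) "")
                (3 + 2 * room_index)).getD ' ')]]) []
      rooms ++ [room]) []
  (hallway, rooms)

-- ===== PORT B =====
-- (line[3], line[5], line[7], line[9]) — pyGet? is none exactly where Python raises; Pre_ excludes that
def pvRoomRow (line : String) : List String :=
  [String.ofList [(PySem.Str.pyGet? line 3).getD ' '],
   String.ofList [(PySem.Str.pyGet? line 5).getD ' '],
   String.ofList [(PySem.Str.pyGet? line 7).getD ' '],
   String.ofList [(PySem.Str.pyGet? line 9).getD ' ']]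

-- zip(*rows): heads of all rows, then recurse on the tails, min-row-length many times
def pvZipGo : Nat → List (List String) → List (List String)
  | 0, _ => []
  | n + 1, rs => rs.map (fun r => r.headD "") :: pvZipGo n (rs.map List.tail)

def pvZipStar (rs : List (List String)) : List (List String) :=
  pvZipGo (((rs.map List.length).min?).getD 0) rs

def parse_initial_state_alt (lines : List String) : List String × List (List String) :=
  -- hallway = tuple(lines[1][1:12])
  let hallway : List String :=
    (PySem.Str.slice (PySem.List.pyGetD lines 1 "") (some 1) (some 12)).toList.map
      (fun c => String.ofList [c])
  -- rows = [(line[3], line[5], line[7], line[9]) for line in lines[2:len(lines) - 1]]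
  let rows : List (List String) :=
    (PySem.List.slice lines (some 2) (some ((lines.length : Int) - 1))).map pvRoomRow
  -- rooms = tuple(zip(*rows)) if rows else ((), (), (), ())
  let rooms : List (List String) := if rows.isEmpty then [[], [], [], []] else pvZipStar rows
  (hallway, rooms)

-- ===== PRECONDITION & SPEC =====
-- Pre_ is exactly where the Python A returns: lines[1] needs len(lines) ≥ 2, and every room row
-- actually read (lines[2] … lines[len-2]) needs ≥ 10 characters, else lines[2+d][3+2*i] raises IndexError.
def Pre_parse_initial_state (lines : List String) : Prop :=
  2 ≤ lines.length ∧ ∀ s ∈ (lines.drop 2).dropLast, 10 ≤ s.toList.length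
instance (lines : List String) : Decidable (Pre_parse_initial_state lines) := by
  unfold Pre_parse_initial_state; infer_instance

def pvWitness_parse_initial_state : List String :=
  ["#############", "#...........#", "###B#C#B#D###", "  #A#D#C#A#", "  #########"]

def Spec_parse_initial_state (lines : List String) (out : List String × List (List String)) : Prop := out = parse_initial_state_alt lines
instance (lines : List String) (out : List String × List (List String)) : Decidable (Spec_parse_initial_state lines out) := by unfold Spec_parse_initial_state; infer_instance

-- ===== CLAIM (what is proved, stated in full; the proofs are below) =====
def Claim_equal_parse_initial_state : Prop := ∀ (lines : List String), Dom_parse_initial_state lines → Pre_parse_initial_state lines → Spec_parse_initial_state lines (parse_initial_state lines)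

-- ===== LEMMAS AND PROOFS =====

theorem pvZipGo_eq (n : Nat) : ∀ rs : List (List String),
    pvZipGo n rs = (List.range n).map (fun i => rs.map (fun r => (r.drop i).headD "")) := by
  induction n with
  | zero => intro rs; simp [pvZipGo]
  | succ n ih =>
    intro rs
    rw [pvZipGo, ih (rs.map List.tail), List.range_succ_eq_map]
    simp [List.map_map, Function.comp, List.head?_eq_getElem?]

theorem pvMin_eq (l : List Nat) (h : ∀ x ∈ l, x = 4) (hne : l ≠ []) : l.min? = some 4 := by
  induction l with
  | nil => simp at hne
  | cons a t ih =>
    have ha : a = 4 := h a (by simp)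
    cases t with
    | nil => simp [ha, List.min?]
    | cons b t' =>
      have h' := ih (fun x hx => h x (List.mem_cons_of_mem a hx)) (by simp)
      rw [List.min?_cons (xs := b :: t')]
      simp_all

-- A's index loop over range(room_depth), applied to lines[2+d], is a map over the row lines
theorem pvRows_eq (lines : List String) (h2 : 2 ≤ lines.length) (g : String → String) :
    (List.range (lines.length - 3)).map
        (fun (k : Nat) => g (PySem.List.pyGetD lines (2 + (k : Int)) "")) =
      ((lines.drop 2).dropLast).map g := by
  apply List.ext_getElem
  · simp [List.dropLast_eq_take]; omega
  · intro i h1 hh2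
    have hi : i < lines.length - 3 := by simpa using h1
    have hlt : 2 + i < lines.length := by omega
    rw [List.getElem_map, List.getElem_map, List.getElem_range]
    rw [show ((2:Int) + (i:Int)) = ((2+i : Nat) : Int) by push_cast; ring]
    rw [PySem.List.pyGetD_natCast]
    rw [List.getD_eq_getElem _ _ (by omega)]
    rw [List.getElem_dropLast, List.getElem_drop]

-- B's lines[2:len(lines)-1] is the same row list A indexes
theorem pvSlice_eq (lines : List String) (h2 : 2 ≤ lines.length) :
    PySem.List.slice lines (some 2) (some ((lines.length : Int) - 1)) =
      (lines.drop 2).dropLast := by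
  rw [PySem.List.slice_toNat lines (by omega) (by omega), List.dropLast_eq_take]
  congr 1
  simp
  omega

-- A's inner loop for one room, as a map over the row lines
theorem pvA_inner (lines : List String) (h2 : 2 ≤ lines.length) (ri : Int) :
      (PySem.List.pyRange 0 ((lines.length : Int) - 3) 1).foldl
        (fun room depth_index => room ++ [String.ofList
          [((PySem.Str.pyGet? (PySem.List.pyGetD lines (2 + depth_index) "")
              (3 + 2 * ri)).getD ' ')]]) [] =
      ((lines.drop 2).dropLast).map
        (fun s => String.ofList [(PySem.Str.pyGet? s (3 + 2 * ri)).getD ' ']) := by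
    rw [PySem.List.foldl_append_singleton_eq_map (fun depth_index => String.ofList
          [((PySem.Str.pyGet? (PySem.List.pyGetD lines (2 + depth_index) "")
              (3 + 2 * ri)).getD ' ')])]
    rw [List.nil_append]
    rw [PySem.List.pyRange_one]
    simp only [zero_add]
    rw [show (((lines.length : Int) - 3 - 0)).toNat = lines.length - 3 by omega]
    rw [List.map_map]
    exact pvRows_eq lines h2 (fun s => String.ofList [(PySem.Str.pyGet? s (3 + 2 * ri)).getD ' '])

theorem pvAppend4 (a b c d : List String) :
    (((([] : List (List String)) ++ [a]) ++ [b]) ++ [c]) ++ [d] = [a, b, c, d] := by simp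

theorem pvMain (lines : List String) (h2 : 2 ≤ lines.length) :
    parse_initial_state lines = parse_initial_state_alt lines := by
  simp only [parse_initial_state, parse_initial_state_alt]
  congr 1
  rw [pvSlice_eq lines h2]
  rw [show PySem.List.pyRange 0 4 1 = [0, 1, 2, 3] from by decide]
  simp only [List.foldl_cons, List.foldl_nil]
  rw [pvA_inner lines h2 0, pvA_inner lines h2 1, pvA_inner lines h2 2, pvA_inner lines h2 3]
  rw [pvAppend4]
  by_cases hE : (lines.drop 2).dropLast = []
  · rw [hE]
    simp only [List.map_nil, List.isEmpty_nil, if_pos]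
  · rw [if_neg (by simp only [List.isEmpty_iff, List.map_eq_nil_iff]; exact hE)]
    rw [pvZipStar, List.map_map,
        pvMin_eq (((lines.drop 2).dropLast).map (List.length ∘ pvRoomRow)) (by
          intro x hx
          rcases List.mem_map.mp hx with ⟨s, hs, rfl⟩
          simp [pvRoomRow, Function.comp]) (by
          simp only [ne_eq, List.map_eq_nil_iff]; exact hE)]
    rw [Option.getD_some, pvZipGo_eq]
    rw [show List.range 4 = [0, 1, 2, 3] from by decide]
    simp only [List.map_cons, List.map_nil, List.map_map, List.cons.injEq, and_true]
    refine ⟨?_, ?_, ?_, ?_⟩ <;>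
      (apply List.map_congr_left; intro s hs; simp [pvRoomRow])

-- ===== VERDICT (by name: the statement is the Claim_ definition above) =====
theorem parse_initial_state_spec : Claim_equal_parse_initial_state := by
  intro lines _ hpre
  unfold Spec_parse_initial_state
  exact pvMain lines hpre.1
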